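-- pv_equiv track=rewrite | github.com/KuroTaiga/RuleExtraction | RuleExtraction_Complex/exercise_rules.py | get_sub_rules_for_activities
-- ===== SOURCE A (Python) =====
-- def get_sub_rules_for_activities(activities: list, body: dict, equipment:dict, other: dict) -> tuple:
--     body_sub_rules = {}
--     equipment_sub_rules = {}
--     other_subrules = {}
--
--     for activity in activities:
--         if activity in body and activity in equipment and activity in other:
--             body_sub_rules[activity] = body[activity]
--             equipment_sub_rules[activity] = equipment[activity]
--             other_subrules[activity] = other[activity]
--         else:
--             raise ValueError(f"Activity '{activity}' not found in the rules.")
--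
--     return body_sub_rules,equipment_sub_rules,other_subrules
-- ===== SOURCE B (Python) =====
-- def get_sub_rules_for_activities(activities: list, body: dict, equipment: dict, other: dict) -> tuple:
--     # Set-intersection validation: an activity is usable iff it is a key of all three dicts.
--     common = body.keys() & equipment.keys() & other.keys()
--     for activity in activities:
--         if activity not in common:
--             raise ValueError(f"Activity '{activity}' not found in the rules.")
--     # Deduplicate while preserving first-occurrence order, then build each dict directly.
--     order = list(dict.fromkeys(activities))
--     return (dict((a, body[a]) for a in order),
--             dict((a, equipment[a]) for a in order),
--             dict((a, other[a]) for a in order))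
-- ===== Notes on version B (the rewrite author's own statement) =====
-- stated objective: alternative
-- what changed: B replaces A's interleaved check-and-insert loop over three accumulator dicts by a set intersection of the three key sets for validation (raising the identical ValueError on the first missing activity), followed by an order-preserving dedup of the activities and a direct per-key build of each result dict from the deduplicated key list.
import Mathlib
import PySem

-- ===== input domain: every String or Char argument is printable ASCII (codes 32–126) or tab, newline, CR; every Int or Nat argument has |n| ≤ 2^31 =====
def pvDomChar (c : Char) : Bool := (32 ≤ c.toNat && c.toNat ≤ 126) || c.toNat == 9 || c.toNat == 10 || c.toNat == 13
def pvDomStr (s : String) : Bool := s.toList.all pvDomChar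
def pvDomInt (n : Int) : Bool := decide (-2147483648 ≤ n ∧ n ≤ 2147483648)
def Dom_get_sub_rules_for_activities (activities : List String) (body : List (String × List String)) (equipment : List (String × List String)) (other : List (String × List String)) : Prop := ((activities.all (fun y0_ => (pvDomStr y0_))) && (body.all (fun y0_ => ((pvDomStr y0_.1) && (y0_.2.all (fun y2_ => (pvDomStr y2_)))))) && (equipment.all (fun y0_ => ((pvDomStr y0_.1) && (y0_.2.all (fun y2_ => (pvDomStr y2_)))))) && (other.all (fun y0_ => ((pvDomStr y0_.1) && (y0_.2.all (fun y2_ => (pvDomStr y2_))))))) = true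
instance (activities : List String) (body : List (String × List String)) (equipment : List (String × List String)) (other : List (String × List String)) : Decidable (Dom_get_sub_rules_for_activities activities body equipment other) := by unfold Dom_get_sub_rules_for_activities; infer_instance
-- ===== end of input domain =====

-- B validates via a set intersection of the three key sets, then deduplicates the activities and builds each result dict by a direct map over the unique keys (same ValueError behaviour); objective: alternative.


-- ===== PORT A =====
-- A's single loop: check membership and insert into the three accumulator dicts; on a missing
-- activity Python raises ValueError — the recursion stops and returns the accumulators (the
-- value there is irrelevant: Pre_ excludes exactly those inputs).
def pvLoopA (body equipment other : PySem.Dict String (List String)) :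
    List String →
    PySem.Dict String (List String) × PySem.Dict String (List String) × PySem.Dict String (List String) →
    PySem.Dict String (List String) × PySem.Dict String (List String) × PySem.Dict String (List String)
  | [], acc => acc
  | a :: rest, (b, e, o) =>
    if body.contains a && equipment.contains a && other.contains a then
      -- membership was just checked, so body[a] etc. cannot raise; getD with [] is exact here
      pvLoopA body equipment other rest
        (b.insert a (body.getD a []), e.insert a (equipment.getD a []), o.insert a (other.getD a []))
    else (b, e, o)  -- raise ValueError(...)

def get_sub_rules_for_activities (activities : List String) (body : List (String × List String)) (equipment : List (String × List String)) (other : List (String × List String)) : (List (String × List String)) × (List (String × List String)) × (List (String × List String)) :=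
  let bd := PySem.Dict.mk body
  let eq := PySem.Dict.mk equipment
  let ot := PySem.Dict.mk other
  let r := pvLoopA bd eq ot activities (PySem.Dict.empty, PySem.Dict.empty, PySem.Dict.empty)
  (r.1.items, r.2.1.items, r.2.2.items)

-- ===== PORT B =====
-- B: common = body.keys() & equipment.keys() & other.keys(); the validation loop raises on the
-- first activity not in common (here: the all-check; on failure B raises, value irrelevant under
-- Pre_); then order = list(dict.fromkeys(activities)) and each dict is built from order.
def get_sub_rules_for_activities_alt (activities : List String) (body : List (String × List String)) (equipment : List (String × List String)) (other : List (String × List String)) : (List (String × List String)) × (List (String × List String)) × (List (String × List String)) :=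
  let bd := PySem.Dict.mk body
  let eq := PySem.Dict.mk equipment
  let ot := PySem.Dict.mk other
  let common : PySem.Set String :=
    PySem.Set.inter (PySem.Set.inter (PySem.Set.ofList bd.keys) eq.keys) ot.keys
  if activities.all (fun a => PySem.Set.contains common a) then
    let order := PySem.List.dedup activities
    ((PySem.Dict.ofList (order.map (fun a => (a, bd.getD a [])))).items,
     (PySem.Dict.ofList (order.map (fun a => (a, eq.getD a [])))).items,
     (PySem.Dict.ofList (order.map (fun a => (a, ot.getD a [])))).items)
  else ([], [], [])  -- raise ValueError(...)

-- ===== PRECONDITION & SPEC =====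
-- A (and B) raise ValueError when some activity is missing from one of the three dicts; Pre_ excludes exactly those inputs.
def Pre_get_sub_rules_for_activities (activities : List String) (body : List (String × List String)) (equipment : List (String × List String)) (other : List (String × List String)) : Prop :=
  activities.all (fun a => (PySem.Dict.mk body).contains a && (PySem.Dict.mk equipment).contains a && (PySem.Dict.mk other).contains a) = true
instance (activities : List String) (body : List (String × List String)) (equipment : List (String × List String)) (other : List (String × List String)) : Decidable (Pre_get_sub_rules_for_activities activities body equipment other) := by unfold Pre_get_sub_rules_for_activities; infer_instance

def pvWitness_get_sub_rules_for_activities : List String × (List (String × List String)) × (List (String × List String)) × (List (String × List String)) :=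
  (["a", "b"], [("a", ["x"]), ("b", [])], [("a", []), ("b", ["y"])], [("b", ["z"]), ("a", ["w"])])

def Spec_get_sub_rules_for_activities (activities : List String) (body : List (String × List String)) (equipment : List (String × List String)) (other : List (String × List String)) (out : (List (String × List String)) × (List (String × List String)) × (List (String × List String))) : Prop := out = get_sub_rules_for_activities_alt activities body equipment other
instance (activities : List String) (body : List (String × List String)) (equipment : List (String × List String)) (other : List (String × List String)) (out : (List (String × List String)) × (List (String × List String)) × (List (String × List String))) : Decidable (Spec_get_sub_rules_for_activities activities body equipment other out) := by unfold Spec_get_sub_rules_for_activities; infer_instance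

-- ===== CLAIM =====
def Claim_equal_get_sub_rules_for_activities : Prop := ∀ (activities : List String) (body : List (String × List String)) (equipment : List (String × List String)) (other : List (String × List String)), Dom_get_sub_rules_for_activities activities body equipment other → Pre_get_sub_rules_for_activities activities body equipment other → Spec_get_sub_rules_for_activities activities body equipment other (get_sub_rules_for_activities activities body equipment other)

-- ===== LEMMAS AND PROOFS =====

-- A key not in the remaining activities is untouched by the insert loop.
theorem getD_fold_not_mem (f : String → List String) (acts : List String)
    (d : PySem.Dict String (List String)) (k : String) (hk : k ∉ acts) :
    (acts.foldl (fun d a => d.insert a (f a)) d).getD k [] = d.getD k [] := by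
  induction acts generalizing d with
  | nil => rfl
  | cons a rest ih =>
    simp only [List.mem_cons, not_or] at hk
    rw [List.foldl_cons, ih _ hk.2, PySem.Dict.getD_insert, if_neg hk.1]

-- In A's insert loop the value stored at a key present in the activities is f of that key.
theorem getD_fold_mem (f : String → List String) (acts : List String)
    (d : PySem.Dict String (List String)) (k : String) (hk : k ∈ acts) :
    (acts.foldl (fun d a => d.insert a (f a)) d).getD k [] = f k := by
  induction acts generalizing d with
  | nil => cases hk
  | cons a rest ih =>
    rw [List.foldl_cons]
    by_cases hr : k ∈ rest
    · exact ih _ hr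
    · have hka : k = a := by rcases List.mem_cons.mp hk with h | h; exact h; exact absurd h hr
      subst hka
      rw [getD_fold_not_mem f rest _ k hr, PySem.Dict.getD_insert_self]

-- A's fold over one accumulator produces exactly B's dedup-then-map items list.
theorem items_fold_const (f : String → List String) (acts : List String) :
    (acts.foldl (fun d a => d.insert a (f a)) PySem.Dict.empty).items
      = (PySem.List.dedup acts).map (fun a => (a, f a)) := by
  have hkeys : (acts.foldl (fun d a => d.insert a (f a)) PySem.Dict.empty).keys
      = PySem.Set.ofList acts := by
    rw [PySem.Dict.keys_foldl_insert acts (fun _ a => f a) PySem.Dict.empty,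
        PySem.Dict.keys_empty, PySem.Set.update_nil_left]
  have hnd : (acts.foldl (fun d a => d.insert a (f a)) PySem.Dict.empty).keys.Nodup := by
    rw [hkeys]; exact PySem.Set.nodup_ofList acts
  rw [PySem.Dict.items_eq_map_keys _ hnd [], hkeys, PySem.List.dedup_eq_ofList]
  refine List.map_congr_left ?_
  intro k hk
  rw [getD_fold_mem f acts _ k ((PySem.Set.mem_ofList acts k).mp hk)]

-- A's interleaved loop, when every activity passes the membership check, is the triple of folds.
theorem pvLoopA_eq_folds (bd eq ot : PySem.Dict String (List String)) (acts : List String)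
    (b e o : PySem.Dict String (List String))
    (h : acts.all (fun a => bd.contains a && eq.contains a && ot.contains a) = true) :
    pvLoopA bd eq ot acts (b, e, o) =
      (acts.foldl (fun d a => d.insert a (bd.getD a [])) b,
       acts.foldl (fun d a => d.insert a (eq.getD a [])) e,
       acts.foldl (fun d a => d.insert a (ot.getD a [])) o) := by
  induction acts generalizing b e o with
  | nil => rfl
  | cons a rest ih =>
    simp only [List.all_cons, Bool.and_eq_true] at h
    simp only [pvLoopA, h.1, Bool.and_self, if_pos, List.foldl_cons]
    exact ih _ _ _ h.2

-- B's Dict.ofList over the deduplicated key list reproduces that list as its items.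
theorem items_ofList_map (f : String → List String) (acts : List String) :
    (PySem.Dict.ofList ((PySem.List.dedup acts).map (fun a => (a, f a)))).items
      = (PySem.List.dedup acts).map (fun a => (a, f a)) := by
  show (((PySem.List.dedup acts).map (fun a => (a, f a))).foldl
      (fun d p => d.insert p.1 p.2) PySem.Dict.empty).items = _
  rw [List.foldl_map]
  rw [PySem.Dict.items_foldl_insert_fresh (PySem.List.dedup acts)
        (fun a => a) (fun a => f a) PySem.Dict.empty
        (fun a _ => PySem.Dict.contains_empty a)
        (by simp [PySem.List.nodup_dedup acts])]
  rfl

-- The membership condition of A (three dict lookups) equals B's set-intersection test.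
theorem cond_eq (bd eq ot : PySem.Dict String (List String)) (a : String) :
    PySem.Set.contains
        (PySem.Set.inter (PySem.Set.inter (PySem.Set.ofList bd.keys) eq.keys) ot.keys) a
      = (bd.contains a && eq.contains a && ot.contains a) := by
  by_cases h : a ∈ PySem.Set.inter (PySem.Set.inter (PySem.Set.ofList bd.keys) eq.keys) ot.keys
  · have hm := h
    rw [PySem.Set.mem_inter, PySem.Set.mem_inter, PySem.Set.mem_ofList] at hm
    rw [(PySem.Set.contains_iff _ a).mpr h,
        (PySem.Dict.contains_iff_mem_keys bd a).mpr hm.1.1,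
        (PySem.Dict.contains_iff_mem_keys eq a).mpr hm.1.2,
        (PySem.Dict.contains_iff_mem_keys ot a).mpr hm.2]
    rfl
  · have hm := h
    rw [PySem.Set.mem_inter, PySem.Set.mem_inter, PySem.Set.mem_ofList] at hm
    have hc : PySem.Set.contains
        (PySem.Set.inter (PySem.Set.inter (PySem.Set.ofList bd.keys) eq.keys) ot.keys) a = false := by
      cases hcc : PySem.Set.contains
          (PySem.Set.inter (PySem.Set.inter (PySem.Set.ofList bd.keys) eq.keys) ot.keys) a
      · rfl
      · exact absurd ((PySem.Set.contains_iff _ a).mp hcc) h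
    rw [hc]
    by_cases h1 : a ∈ bd.keys
    · by_cases h2 : a ∈ eq.keys
      · have h3 : a ∉ ot.keys := fun h3 => hm ⟨⟨h1, h2⟩, h3⟩
        have : ot.contains a = false := by
          cases hcc : ot.contains a
          · rfl
          · exact absurd ((PySem.Dict.contains_iff_mem_keys ot a).mp hcc) h3
        rw [this, Bool.and_false]
      · have : eq.contains a = false := by
          cases hcc : eq.contains a
          · rfl
          · exact absurd ((PySem.Dict.contains_iff_mem_keys eq a).mp hcc) h2
        rw [this, Bool.and_false, Bool.false_and]
    · have : bd.contains a = false := by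
        cases hcc : bd.contains a
        · rfl
        · exact absurd ((PySem.Dict.contains_iff_mem_keys bd a).mp hcc) h1
      rw [this, Bool.false_and, Bool.false_and]

-- ===== VERDICT =====
theorem get_sub_rules_for_activities_spec : Claim_equal_get_sub_rules_for_activities := by
  intro activities body equipment other _ hpre
  unfold Pre_get_sub_rules_for_activities at hpre
  unfold Spec_get_sub_rules_for_activities get_sub_rules_for_activities get_sub_rules_for_activities_alt
  simp only
  have hcond : activities.all (fun a =>
      PySem.Set.contains (PySem.Set.inter (PySem.Set.inter
        (PySem.Set.ofList (PySem.Dict.mk body).keys) (PySem.Dict.mk equipment).keys)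
        (PySem.Dict.mk other).keys) a) = true := by
    rw [List.all_eq_true] at hpre ⊢
    intro a ha
    rw [cond_eq]
    exact hpre a ha
  rw [pvLoopA_eq_folds _ _ _ _ _ _ _ hpre, if_pos hcond]
  simp only
  rw [items_fold_const, items_fold_const, items_fold_const,
      items_ofList_map, items_ofList_map, items_ofList_map]
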